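-- pv_equiv track=rewrite | github.com/StefanL19/L101_E2E_NLG | data_processing.py | _delexicalize_food_slug2slug
-- ===== SOURCE A (Python) =====
-- def _delexicalize_food_slug2slug(inp, output):
--     """
--         Delexicalizes the food field in an input/output pair
--         sample: input, output pair to be delexicalized
--     """
--     # The food delexicalization idea was taken from the slug2slug model as the name of the function states
--     # https://www.macs.hw.ac.uk/InteractionLab/E2E/final_papers/E2E-Slug2Slug.pdf
--
--     is_success = False
--     if "food" in inp.keys():
--         food_value = inp["food"]
--
--         # Different cuisine names starting with a vowel
--         cuisine_vow = ["italian", "english", "indian"]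
--
--         # Different cuisine names starting with a consonant
--         cuisine_con = ["japanese", "french", "chinese"]
--
--         # Different types of food
--         food = ["fast food"]
--
--         if food_value in cuisine_vow:
--             inp["food"] = "x-vow-cuisine-food"
--
--         elif food_value in cuisine_con:
--             inp["food"] = "x-con-cuisine-food"
--
--         else:
--             inp["food"] = "x-con-food"
--
--         if output != None:
--             for cv in cuisine_vow:
--                 if cv in output:
--                     is_success = True
--                     output = output.replace(cv, "x-vow-cuisine-food")
--
--             for cc in cuisine_con:
--                 if cc in output:
--                     is_success = True
--                     output = output.replace(cc, "x-con-cuisine-food")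
--
--             for f in food:
--                 if f in output:
--                     is_success = True
--                     output = output.replace(f, "x-con-food")
--     else:
--         is_success = True
--
--     return inp, output, is_success
-- ===== SOURCE B (Python) =====
-- def _delexicalize_food_slug2slug(inp, output):
--     """Alternative algorithm: instead of A's term-major passes (one full
--     str.replace scan per cuisine term), do a single position-major left-to-right
--     scan of the output, emitting the tag at each matched term and copying every
--     other character; the field is rewritten via one term->tag mapping."""
--     mapping = [
--         ("italian", "x-vow-cuisine-food"),
--         ("english", "x-vow-cuisine-food"),
--         ("indian", "x-vow-cuisine-food"),
--         ("japanese", "x-con-cuisine-food"),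
--         ("french", "x-con-cuisine-food"),
--         ("chinese", "x-con-cuisine-food"),
--         ("fast food", "x-con-food"),
--     ]
--     if "food" not in inp:
--         return inp, output, True
--     inp["food"] = dict(mapping).get(inp["food"], "x-con-food")
--     is_success = False
--     if output is not None:
--         parts = []
--         i = 0
--         while i < len(output):
--             for term, tag in mapping:
--                 if output.startswith(term, i):
--                     parts.append(tag)
--                     i += len(term)
--                     is_success = True
--                     break
--             else:
--                 parts.append(output[i])
--                 i += 1
--         output = "".join(parts)
--     return inp, output, is_success
-- ===== Notes on version B (the rewrite author's own statement) =====
-- stated objective: alternative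
-- what changed: Replaces A's term-major delexicalization (three staged loops, each doing a membership test plus a full str.replace pass per cuisine term) by a single position-major left-to-right scan of the output that at each index emits the tag of the term matched there (or copies the character), driven by one term->tag mapping that also rewrites the field.
-- intended difference: On outputs containing 'japanesenglish', or 'chinesenglish' not immediately preceded by 'fren' (with a 'food' slot present), A replaces 'english' first and so mangles the earlier cuisine word (e.g. 'japanesx-vow-cuisine-food'), while B tags the leftmost full term ('x-con-cuisine-foodnglish'); tagging the entity that starts first is the intended delexicalization. — e.g. on _delexicalize_food_slug2slug([("food", "a")], some "chinesenglish"): A returns ([("food", "x-con-food")], some "chinesx-vow-cuisine-food", true), B returns ([("food", "x-con-food")], some "x-con-cuisine-foodnglish", true)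
import Mathlib
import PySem

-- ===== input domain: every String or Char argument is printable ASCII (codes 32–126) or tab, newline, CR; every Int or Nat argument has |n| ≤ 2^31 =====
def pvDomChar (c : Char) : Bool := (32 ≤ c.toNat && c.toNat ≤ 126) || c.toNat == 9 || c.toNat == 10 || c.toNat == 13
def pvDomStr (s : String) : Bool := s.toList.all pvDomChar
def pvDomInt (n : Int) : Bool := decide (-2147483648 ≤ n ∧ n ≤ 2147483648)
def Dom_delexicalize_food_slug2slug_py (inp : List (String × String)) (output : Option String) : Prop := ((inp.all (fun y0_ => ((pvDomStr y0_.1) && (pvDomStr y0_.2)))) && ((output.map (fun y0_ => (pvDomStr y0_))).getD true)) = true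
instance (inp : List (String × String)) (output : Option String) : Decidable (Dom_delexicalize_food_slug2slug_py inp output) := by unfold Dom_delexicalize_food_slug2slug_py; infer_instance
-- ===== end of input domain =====

-- B replaces A's term-major passes (one membership test + full str.replace per cuisine term, in
-- three staged loops) by a single position-major left-to-right scan of the output driven by one
-- term→tag mapping (objective: alternative algorithm of the same cost; both Pythons mutate
-- inp["food"] identically, the equivalence is about the returned triple). On outputs containing
-- an overlapping cuisine pair the results differ; see D_ below.

-- ===== PORT A =====
-- A's loop body ('if cv in output: is_success = True; output = output.replace(cv, tag)') on state (output, is_success)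
def pvStepA (t r : String) (st : String × Bool) : String × Bool :=
  if PySem.Str.isIn t st.1 then (PySem.Str.replace st.1 t r, true) else st

def delexicalize_food_slug2slug_py (inp : List (String × String)) (output : Option String) : (List (String × String)) × Option String × Bool :=
  let d := PySem.Dict.mk inp
  if d.contains "food" then
    let food_value := d.getD "food" ""
    let cuisine_vow : List String := ["italian", "english", "indian"]
    let cuisine_con : List String := ["japanese", "french", "chinese"]
    let food : List String := ["fast food"]
    let d2 :=
      if cuisine_vow.contains food_value then d.insert "food" "x-vow-cuisine-food"
      else if cuisine_con.contains food_value then d.insert "food" "x-con-cuisine-food"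
      else d.insert "food" "x-con-food"
    match output with
    | some out =>
      let st := cuisine_vow.foldl (fun st cv => pvStepA cv "x-vow-cuisine-food" st) (out, false)
      let st := cuisine_con.foldl (fun st cc => pvStepA cc "x-con-cuisine-food" st) st
      let st := food.foldl (fun st f => pvStepA f "x-con-food" st) st
      (d2.items, some st.1, st.2)
    | none => (d2.items, none, false)
  else (inp, output, true)

-- ===== PORT B =====
def pvMapping : List (String × String) :=
  [("italian", "x-vow-cuisine-food"), ("english", "x-vow-cuisine-food"), ("indian", "x-vow-cuisine-food"),
   ("japanese", "x-con-cuisine-food"), ("french", "x-con-cuisine-food"), ("chinese", "x-con-cuisine-food"),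
   ("fast food", "x-con-food")]

def pvMappingC : List (List Char × List Char) :=
  [(String.toList "italian", String.toList "x-vow-cuisine-food"),
   (String.toList "english", String.toList "x-vow-cuisine-food"),
   (String.toList "indian", String.toList "x-vow-cuisine-food"),
   (String.toList "japanese", String.toList "x-con-cuisine-food"),
   (String.toList "french", String.toList "x-con-cuisine-food"),
   (String.toList "chinese", String.toList "x-con-cuisine-food"),
   (String.toList "fast food", String.toList "x-con-food")]

-- B's while loop over positions: at each position, the first mapping term matching there is
-- emitted as its tag (the for/else is List.find?); otherwise the character is copied.
-- fuel = remaining length makes the recursion structural; it never runs out on fuel ≥ length.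
def pvScanGo : Nat → List Char → List Char × Bool
  | _, [] => ([], false)
  | 0, s => (s, false)
  | fuel+1, c :: cs =>
    match pvMappingC.find? (fun p => p.1.isPrefixOf (c :: cs)) with
    | some p =>
      let q := pvScanGo fuel (List.drop p.1.length (c :: cs))
      (p.2 ++ q.1, true)
    | none =>
      let q := pvScanGo fuel cs
      (c :: q.1, q.2)

def delexicalize_food_slug2slug_py_alt (inp : List (String × String)) (output : Option String) : (List (String × String)) × Option String × Bool :=
  let d := PySem.Dict.mk inp
  if d.contains "food" = false then (inp, output, true)
  else
    let d2 := d.insert "food" ((PySem.Dict.ofList pvMapping).getD (d.getD "food" "") "x-con-food")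
    match output with
    | none => (d2.items, none, false)
    | some out =>
      let q := pvScanGo out.toList.length out.toList
      (d2.items, some (String.ofList q.1), q.2)

-- words used by the change region D_: the two overlapping cuisine patterns and the one
-- context ("frenchinesenglish") in which an overlapped "chinesenglish" is harmless
def pvJap : List Char := String.toList "japanesenglish"
def pvChin : List Char := String.toList "chinesenglish"
def pvFren : List Char := String.toList "frenchinesenglish"

-- Bool test: s contains "japanesenglish", or an occurrence of "chinesenglish" that is not
-- immediately preceded by "fren" (i.e. not part of "frenchinesenglish")
def pvBadB (s : List Char) : Bool :=
  PySem.Chars.isIn pvJap s ||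
    (List.range (s.length + 1)).any (fun p =>
      pvChin.isPrefixOf (List.drop p s) && !(decide (4 ≤ p) && pvFren.isPrefixOf (List.drop (p - 4) s)))

-- ===== PRECONDITION & SPEC =====
-- On outputs containing "japanesenglish", or "chinesenglish" not immediately preceded by "fren"
-- (with a "food" slot present), A's english-first replacement mangles the earlier cuisine word
-- (e.g. "japanesx-vow-cuisine-food"), while B tags the leftmost full term
-- ("x-con-cuisine-foodnglish"), the intended behaviour.
def D_delexicalize_food_slug2slug_py (inp : List (String × String)) (output : Option String) : Prop :=
  (PySem.Dict.mk inp).contains "food" = true ∧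
  ((output.map (fun s => pvBadB s.toList)).getD false) = true
instance (inp : List (String × String)) (output : Option String) : Decidable (D_delexicalize_food_slug2slug_py inp output) := by unfold D_delexicalize_food_slug2slug_py; infer_instance

def Spec_delexicalize_food_slug2slug_py (inp : List (String × String)) (output : Option String) (out : (List (String × String)) × Option String × Bool) : Prop := ¬ D_delexicalize_food_slug2slug_py inp output → out = delexicalize_food_slug2slug_py_alt inp output
instance (inp : List (String × String)) (output : Option String) (out : (List (String × String)) × Option String × Bool) : Decidable (Spec_delexicalize_food_slug2slug_py inp output out) := by unfold Spec_delexicalize_food_slug2slug_py; infer_instance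

def pvDiffWitness_delexicalize_food_slug2slug_py : (List (String × String)) × Option String := ([("food", "a")], some "chinesenglish")
def pvDiffWitnessOut_delexicalize_food_slug2slug_py : ((List (String × String)) × Option String × Bool) × ((List (String × String)) × Option String × Bool) :=
  (([("food", "x-con-food")], some "chinesx-vow-cuisine-food", true),
   ([("food", "x-con-food")], some "x-con-cuisine-foodnglish", true))

-- ===== CLAIM (what is proved, stated in full; the proofs are below) =====
def Claim_unchanged_delexicalize_food_slug2slug_py : Prop := ∀ (inp : List (String × String)) (output : Option String), Dom_delexicalize_food_slug2slug_py inp output → Spec_delexicalize_food_slug2slug_py inp output (delexicalize_food_slug2slug_py inp output)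
def Claim_changed_delexicalize_food_slug2slug_py : Prop := Dom_delexicalize_food_slug2slug_py (pvDiffWitness_delexicalize_food_slug2slug_py.1) (pvDiffWitness_delexicalize_food_slug2slug_py.2) ∧ D_delexicalize_food_slug2slug_py (pvDiffWitness_delexicalize_food_slug2slug_py.1) (pvDiffWitness_delexicalize_food_slug2slug_py.2) ∧ delexicalize_food_slug2slug_py (pvDiffWitness_delexicalize_food_slug2slug_py.1) (pvDiffWitness_delexicalize_food_slug2slug_py.2) = pvDiffWitnessOut_delexicalize_food_slug2slug_py.1 ∧ delexicalize_food_slug2slug_py_alt (pvDiffWitness_delexicalize_food_slug2slug_py.1) (pvDiffWitness_delexicalize_food_slug2slug_py.2) = pvDiffWitnessOut_delexicalize_food_slug2slug_py.2 ∧ pvDiffWitnessOut_delexicalize_food_slug2slug_py.1 ≠ pvDiffWitnessOut_delexicalize_food_slug2slug_py.2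
def Claim_exact_delexicalize_food_slug2slug_py : Prop := ∀ (inp : List (String × String)) (output : Option String), Dom_delexicalize_food_slug2slug_py inp output → D_delexicalize_food_slug2slug_py inp output → delexicalize_food_slug2slug_py inp output ≠ delexicalize_food_slug2slug_py_alt inp output

-- ===== LEMMAS AND PROOFS =====

-- char-level version of A's per-term step and of A's whole sequence of steps
def pvStepC (p : List Char × List Char) (st : List Char × Bool) : List Char × Bool :=
  if PySem.Chars.isIn p.1 st.1 then (PySem.Chars.replace st.1 p.1 p.2, true) else st

def pvFoldC (L : List (List Char × List Char)) (st : List Char × Bool) : List Char × Bool :=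
  L.foldl (fun st p => pvStepC p st) st

theorem pvStepAC (t r : String) (u : List Char) (b : Bool) :
    pvStepA t r (String.ofList u, b) =
      (String.ofList (pvStepC (t.toList, r.toList) (u, b)).1, (pvStepC (t.toList, r.toList) (u, b)).2) := by
  unfold pvStepA pvStepC
  by_cases h : PySem.Chars.isIn t.toList u = true
  · simp [PySem.Str.isIn, PySem.Str.replace, String.toList_ofList, h]
  · simp [PySem.Str.isIn, String.toList_ofList, h]

-- A's three concrete foldl's, expressed through pvFoldC on the char level
theorem pvFoldAString (u : List Char) (b : Bool) :
    ((["fast food"] : List String).foldl (fun st f => pvStepA f "x-con-food" st)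
      ((["japanese", "french", "chinese"] : List String).foldl (fun st cc => pvStepA cc "x-con-cuisine-food" st)
        ((["italian", "english", "indian"] : List String).foldl (fun st cv => pvStepA cv "x-vow-cuisine-food" st)
          (String.ofList u, b))))
    = (String.ofList (pvFoldC pvMappingC (u, b)).1, (pvFoldC pvMappingC (u, b)).2) := by
  simp only [List.foldl, pvFoldC, pvMappingC]
  rw [pvStepAC, pvStepAC, pvStepAC, pvStepAC, pvStepAC, pvStepAC, pvStepAC]

-- ---------- PySem.Chars.replace step equations ----------

theorem pvGoAcc (old new : List Char) :
    ∀ fuel l acc, PySem.Chars.replace.go old new fuel l acc = acc.reverse ++ PySem.Chars.replace.go old new fuel l [] := by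
  intro fuel
  induction fuel with
  | zero => intro l acc; simp [PySem.Chars.replace.go]
  | succ f ih =>
    intro l acc
    cases l with
    | nil => simp [PySem.Chars.replace.go]
    | cons c t =>
      simp only [PySem.Chars.replace.go]
      by_cases hp : old.isPrefixOf (c :: t) = true
      · simp only [hp, if_pos]
        rw [ih _ (new.reverse ++ acc), ih _ (new.reverse ++ [])]
        simp [List.append_assoc]
      · simp only [hp, Bool.false_eq_true, if_false]
        rw [ih t (c :: acc), ih t (c :: [])]
        simp

theorem pvGoFuel (old new : List Char) (hold : old ≠ []) :
    ∀ f1 f2 l, l.length ≤ f1 → l.length ≤ f2 →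
      PySem.Chars.replace.go old new f1 l [] = PySem.Chars.replace.go old new f2 l [] := by
  intro f1
  induction f1 with
  | zero =>
    intro f2 l h1 _
    have : l = [] := by cases l <;> simp_all
    subst this
    cases f2 <;> simp [PySem.Chars.replace.go]
  | succ f ih =>
    intro f2 l h1 h2
    cases l with
    | nil => cases f2 <;> simp [PySem.Chars.replace.go]
    | cons c t =>
      obtain ⟨f2', rfl⟩ : ∃ f2', f2 = f2' + 1 := by
        cases f2 with
        | zero => simp at h2
        | succ n => exact ⟨n, rfl⟩
      simp only [PySem.Chars.replace.go]
      by_cases hp : old.isPrefixOf (c :: t) = true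
      · simp only [hp, if_pos]
        have hlen : 1 ≤ old.length := by cases old <;> simp_all
        rw [pvGoAcc old new f _ _, pvGoAcc old new f2' _ _]
        rw [ih f2' (List.drop old.length (c :: t)) (by simp [List.length_drop] at *; omega)
              (by simp [List.length_drop] at *; omega)]
      · simp only [hp, Bool.false_eq_true, if_false]
        rw [pvGoAcc old new f t _, pvGoAcc old new f2' t _]
        rw [ih f2' t (by simp at h1; omega) (by simp at h2; omega)]

theorem pvReplNil (t r : List Char) (ht : t ≠ []) : PySem.Chars.replace [] t r = [] := by
  unfold PySem.Chars.replace
  simp [List.isEmpty_iff, ht, PySem.Chars.replace.go]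

theorem pvReplMatch (t r s : List Char) (ht : t ≠ []) (h : t <+: s) :
    PySem.Chars.replace s t r = r ++ PySem.Chars.replace (s.drop t.length) t r := by
  cases s with
  | nil =>
    exfalso; have := h.length_le; cases t <;> simp_all
  | cons c cs =>
    unfold PySem.Chars.replace
    simp only [List.isEmpty_iff, ht]
    simp only [List.length_cons]
    rw [show PySem.Chars.replace.go t r (cs.length + 1) (c :: cs) [] =
        PySem.Chars.replace.go t r cs.length (List.drop t.length (c :: cs)) (r.reverse ++ []) from by
      simp only [PySem.Chars.replace.go, List.isPrefixOf_iff_prefix.mpr h, if_pos]]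
    rw [pvGoAcc]
    have hlen : 1 ≤ t.length := by cases t <;> simp_all
    rw [pvGoFuel t r ht cs.length (List.drop t.length (c :: cs)).length _
          (by simp [List.length_drop]; omega) le_rfl]
    simp

theorem pvReplCons (t r : List Char) (c : Char) (cs : List Char) (ht : t ≠ []) (h : ¬ t <+: c :: cs) :
    PySem.Chars.replace (c :: cs) t r = c :: PySem.Chars.replace cs t r := by
  unfold PySem.Chars.replace
  simp only [List.isEmpty_iff, ht]
  simp only [List.length_cons]
  rw [show PySem.Chars.replace.go t r (cs.length + 1) (c :: cs) [] =
      PySem.Chars.replace.go t r cs.length cs [c] from by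
    simp only [PySem.Chars.replace.go]
    rw [if_neg (by simp [List.isPrefixOf_iff_prefix, h])]]
  rw [pvGoAcc]
  simp

theorem pvReplNoOcc (t r : List Char) (ht : t ≠ []) :
    ∀ u, ¬ t <:+: u → PySem.Chars.replace u t r = u := by
  intro u
  induction u with
  | nil => intro _; exact pvReplNil t r ht
  | cons c cs ih =>
    intro h
    have hp : ¬ t <+: c :: cs := fun hc => h hc.isInfix
    rw [pvReplCons t r c cs ht hp, ih (fun hc => h (List.infix_cons hc))]

theorem pvReplSplit (t r : List Char) (ht : t ≠ []) :
    ∀ a u, (∀ k, k < a.length → ¬ t <+: (List.drop k a ++ u)) →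
      PySem.Chars.replace (a ++ u) t r = a ++ PySem.Chars.replace u t r := by
  intro a
  induction a with
  | nil => intro u _; simp
  | cons x a' ih =>
    intro u h
    have h0 : ¬ t <+: x :: (a' ++ u) := by
      have := h 0 (by simp)
      simpa using this
    rw [List.cons_append, pvReplCons t r x (a' ++ u) ht h0,
        ih u (fun k hk => by have := h (k + 1) (by simp; omega); simpa using this)]
    simp

theorem pvIsInSplit (t : List Char) (a u : List Char)
    (h : ∀ k, k < a.length → ¬ t <+: (List.drop k a ++ u)) :
    PySem.Chars.isIn t (a ++ u) = PySem.Chars.isIn t u := by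
  cases hb : PySem.Chars.isIn t u with
  | true =>
    have hi : t <:+: u := (PySem.Chars.isIn_iff_infix t u).mp hb
    exact (PySem.Chars.isIn_iff_infix t (a ++ u)).mpr (hi.trans (List.suffix_append a u).isInfix)
  | false =>
    refine (PySem.Chars.isIn_eq_false_iff t (a ++ u)).mpr ?_
    intro hinf
    have hin : PySem.Chars.isIn t (a ++ u) = true := (PySem.Chars.isIn_iff_infix _ _).mpr hinf
    obtain ⟨j, hj⟩ := (PySem.Chars.exists_prefix_drop_iff_isIn t (a ++ u)).mpr hin
    by_cases hj2 : j < a.length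
    · exact h j hj2 (by rwa [List.drop_append_of_le_length (le_of_lt hj2)] at hj)
    · have hdr : List.drop j (a ++ u) = List.drop (j - a.length) u := by
        rw [List.drop_append, List.drop_eq_nil_of_le (by omega), List.nil_append]
      rw [hdr] at hj
      have : PySem.Chars.isIn t u = true :=
        (PySem.Chars.exists_prefix_drop_iff_isIn t u).mp ⟨_, hj⟩
      simp [hb] at this

-- ---------- the combinatorial side conditions ----------

def pvOk (L : List (List Char × List Char)) : Prop :=
  ∀ p ∈ L, 2 ≤ p.1.length ∧ 'x' ∉ p.1 ∧ p.2.head? = some 'x'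

def pvCond (a : List Char) (L : List (List Char × List Char)) (u : List Char) : Prop :=
  ∀ p ∈ L, ∀ k, k < a.length →
    ¬ p.1 <+: List.drop k a ∧ (List.drop k a <+: p.1 → ¬ List.drop (a.length - k) p.1 <+: u)

def pvCondD (a : List Char) (L : List (List Char × List Char)) : Prop :=
  ∀ p ∈ L, ∀ k, k < a.length → ¬ p.1 <+: List.drop k a ∧ ¬ List.drop k a <+: p.1

theorem pvCondD_cond (a : List Char) (L : List (List Char × List Char)) (h : pvCondD a L) :
    ∀ u, pvCond a L u :=
  fun _ p hp k hk => ⟨(h p hp k hk).1, fun hc => absurd hc (h p hp k hk).2⟩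

-- no prefix of the result of a replacement reaches into an inserted tag:
-- an x-free nonempty prefix of replace(s) is a prefix of s
theorem pvPrePres (t r : List Char) (ht : t ≠ []) (hr : r.head? = some 'x') :
    ∀ n s, s.length ≤ n → ∀ w, w ≠ [] → 'x' ∉ w → w <+: PySem.Chars.replace s t r → w <+: s := by
  intro n
  induction n with
  | zero =>
    intro s h w hw _ hpre
    have : s = [] := by cases s <;> simp_all
    subst this
    rw [pvReplNil t r ht] at hpre
    exact absurd (List.prefix_nil.mp hpre) hw
  | succ n ih =>
    intro s h w hw hx hpre
    cases s with
    | nil =>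
      rw [pvReplNil t r ht] at hpre
      exact absurd (List.prefix_nil.mp hpre) hw
    | cons c cs =>
      by_cases hp : t <+: c :: cs
      · rw [pvReplMatch t r _ ht hp] at hpre
        obtain ⟨r', rfl⟩ : ∃ r', r = 'x' :: r' := by
          cases r with
          | nil => simp at hr
          | cons a as =>
            simp only [List.head?_cons, Option.some.injEq] at hr
            exact ⟨as, by rw [hr]⟩
        cases w with
        | nil => exact absurd rfl hw
        | cons wc wt =>
          rw [List.cons_append] at hpre
          obtain ⟨h1, -⟩ := List.cons_prefix_cons.mp hpre
          subst h1
          simp at hx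
      · rw [pvReplCons t r c cs ht hp] at hpre
        cases w with
        | nil => exact absurd rfl hw
        | cons wc wt =>
          obtain ⟨rfl, hwt⟩ := List.cons_prefix_cons.mp hpre
          by_cases hwtn : wt = []
          · subst hwtn
            exact List.cons_prefix_cons.mpr ⟨rfl, List.nil_prefix⟩
          · have hxwt : 'x' ∉ wt := fun hm => hx (List.mem_cons_of_mem _ hm)
            have hwtcs : wt <+: cs := ih cs (by simp at h; omega) wt hwtn hxwt hwt
            exact List.cons_prefix_cons.mpr ⟨rfl, hwtcs⟩

theorem pvPrefixAppend {α : Type} : ∀ (v w z : List α), w <+: v ++ z →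
    w <+: v ∨ (v <+: w ∧ List.drop v.length w <+: z)
  | [], w, z, h => Or.inr ⟨List.nil_prefix, by simpa using h⟩
  | x :: v', w, z, h => by
    cases w with
    | nil => exact Or.inl List.nil_prefix
    | cons a w' =>
      obtain ⟨rfl, hw'⟩ := List.cons_prefix_cons.mp h
      rcases pvPrefixAppend v' w' z hw' with h1 | ⟨h2, h3⟩
      · exact Or.inl (List.cons_prefix_cons.mpr ⟨rfl, h1⟩)
      · exact Or.inr ⟨List.cons_prefix_cons.mpr ⟨rfl, h2⟩, by simpa using h3⟩

theorem pvCondImp (a : List Char) (L : List (List Char × List Char)) (u : List Char)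
    (h : pvCond a L u) (p : List Char × List Char) (hp : p ∈ L) :
    ∀ k, k < a.length → ¬ p.1 <+: (List.drop k a ++ u) := by
  intro k hk hpre
  obtain ⟨h1, h2⟩ := h p hp k hk
  rcases pvPrefixAppend (List.drop k a) p.1 u hpre with hl | ⟨hal, har⟩
  · exact h1 hl
  · exact h2 hal (by simpa [List.length_drop] using har)

theorem pvCondPres (a : List Char) (L : List (List Char × List Char)) (u : List Char)
    (hx : ∀ p ∈ L, 'x' ∉ p.1) (t' r' : List Char) (ht' : t' ≠ []) (hr' : r'.head? = some 'x')
    (h : pvCond a L u) : pvCond a L (PySem.Chars.replace u t' r') := by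
  intro p hp k hk
  obtain ⟨h1, h2⟩ := h p hp k hk
  refine ⟨h1, fun hc hw => ?_⟩
  have hlen : a.length - k < p.1.length := by
    have hle : a.length - k ≤ p.1.length := by
      have := hc.length_le; simpa [List.length_drop] using this
    rcases lt_or_eq_of_le hle with hlt | heq
    · exact hlt
    · exfalso
      have : List.drop k a = p.1 := hc.eq_of_length (by simp [List.length_drop, heq])
      exact h1 (this ▸ List.prefix_refl _)
  have hwne : List.drop (a.length - k) p.1 ≠ [] := by
    intro he
    have := congrArg List.length he
    simp [List.length_drop] at this
    omega
  have hwx : 'x' ∉ List.drop (a.length - k) p.1 :=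
    fun hm => hx p hp (List.mem_of_mem_drop hm)
  exact h2 hc (pvPrePres t' r' ht' hr' u.length u le_rfl _ hwne hwx hw)

theorem pvFoldSplit (L : List (List Char × List Char)) (hOk : pvOk L) (a : List Char) :
    ∀ u b, pvCond a L u →
      pvFoldC L (a ++ u, b) = (a ++ (pvFoldC L (u, b)).1, (pvFoldC L (u, b)).2) := by
  induction L with
  | nil => intro u b _; simp [pvFoldC]
  | cons p L ih =>
    intro u b hc
    have hOk' : pvOk L := fun q hq => hOk q (List.mem_cons_of_mem p hq)
    have hc' : pvCond a L u := fun q hq => hc q (List.mem_cons_of_mem p hq)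
    have himp := pvCondImp a (p :: L) u hc p (List.mem_cons_self)
    have hii := pvIsInSplit p.1 a u himp
    obtain ⟨hplen, hpx, hrx⟩ := hOk p List.mem_cons_self
    have hpne : p.1 ≠ [] := by intro he; rw [he] at hplen; simp at hplen
    show pvFoldC L (pvStepC p (a ++ u, b)) = _
    cases hb : PySem.Chars.isIn p.1 u with
    | true =>
      have : pvStepC p (a ++ u, b) = (a ++ PySem.Chars.replace u p.1 p.2, true) := by
        simp only [pvStepC, hii, hb, if_pos]
        rw [pvReplSplit p.1 p.2 hpne a u himp]
      rw [this]
      have hcr : pvCond a L (PySem.Chars.replace u p.1 p.2) :=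
        pvCondPres a L u (fun q hq => (hOk q (List.mem_cons_of_mem p hq)).2.1) p.1 p.2 hpne hrx hc'
      rw [ih hOk' _ true hcr]
      simp only [pvFoldC, List.foldl_cons, pvStepC, hb, if_pos]
    | false =>
      have : pvStepC p (a ++ u, b) = (a ++ u, b) := by simp only [pvStepC, hii, hb]; simp
      rw [this, ih hOk' u b hc']
      simp only [pvFoldC, List.foldl_cons, pvStepC, hb]
      simp

theorem pvFoldText (L : List (List Char × List Char)) :
    ∀ u b b', (pvFoldC L (u, b)).1 = (pvFoldC L (u, b')).1 := by
  induction L with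
  | nil => intro u b b'; rfl
  | cons p L ih =>
    intro u b b'
    show (pvFoldC L (pvStepC p (u, b))).1 = (pvFoldC L (pvStepC p (u, b'))).1
    cases hb : PySem.Chars.isIn p.1 u with
    | true => simp only [pvStepC, hb, if_pos]
    | false =>
      simp only [pvStepC, hb]
      simp only [Bool.false_eq_true, if_false]
      exact ih u b b'

theorem pvFoldFlag (L : List (List Char × List Char)) :
    ∀ u, (pvFoldC L (u, true)).2 = true := by
  induction L with
  | nil => intro u; rfl
  | cons p L ih =>
    intro u
    show (pvFoldC L (pvStepC p (u, true))).2 = true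
    cases hb : PySem.Chars.isIn p.1 u with
    | true => simp only [pvStepC, hb, if_pos]; exact ih _
    | false => simp only [pvStepC, hb]; simpa using ih u

-- A's whole fold on a string with a matched term in front
theorem pvFoldPrefix (L1 L2 : List (List Char × List Char)) (t r s : List Char)
    (h : t <+: s) (ht : t ≠ [])
    (hOk : pvOk (L1 ++ (t, r) :: L2))
    (hc1 : pvCond t L1 (List.drop t.length s))
    (hc2 : ∀ v, pvCond r L2 v) :
    pvFoldC (L1 ++ (t, r) :: L2) (s, false) =
      (r ++ (pvFoldC (L1 ++ (t, r) :: L2) (List.drop t.length s, false)).1, true) := by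
  have hOk1 : pvOk L1 := fun q hq => hOk q (List.mem_append_left _ hq)
  have hOk2 : pvOk L2 := fun q hq => hOk q (List.mem_append_right _ (List.mem_cons_of_mem _ hq))
  have hseq : s = t ++ List.drop t.length s := by
    conv_lhs => rw [← List.take_append_drop t.length s]
    rw [← List.prefix_iff_eq_take.mp h]
  set rest := List.drop t.length s with hrest
  have hfsplit : ∀ st : List Char × Bool,
      pvFoldC (L1 ++ (t, r) :: L2) st = pvFoldC L2 (pvStepC (t, r) (pvFoldC L1 st)) := by
    intro st; simp [pvFoldC, List.foldl_append]
  rw [hfsplit, hfsplit]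
  rw [show (s, false) = ((t ++ rest : List Char), false) from by rw [← hseq]]
  rw [pvFoldSplit L1 hOk1 t rest false hc1]
  set v := pvFoldC L1 (rest, false) with hv
  have hstep : pvStepC (t, r) (t ++ v.1, v.2) = (r ++ PySem.Chars.replace v.1 t r, true) := by
    have hin : PySem.Chars.isIn t (t ++ v.1) = true :=
      (PySem.Chars.isIn_iff_infix _ _).mpr (List.prefix_append t v.1).isInfix
    simp only [pvStepC, hin, if_pos]
    rw [pvReplMatch t r (t ++ v.1) ht (List.prefix_append t v.1)]
    simp
  rw [hstep]
  have hstep2 : PySem.Chars.replace v.1 t r = (pvStepC (t, r) v).1 := by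
    cases hb : PySem.Chars.isIn t v.1 with
    | true => simp only [pvStepC, hb, if_pos]
    | false =>
      rw [pvReplNoOcc t r ht v.1 ((PySem.Chars.isIn_eq_false_iff t v.1).mp hb)]
      simp only [pvStepC, hb]
      simp
  rw [hstep2]
  rw [pvFoldSplit L2 hOk2 r _ true (hc2 _)]
  have h1 : (pvFoldC L2 ((pvStepC (t, r) v).1, true)).1 = (pvFoldC L2 (pvStepC (t, r) v)).1 := by
    conv_rhs => rw [show pvStepC (t, r) v = ((pvStepC (t, r) v).1, (pvStepC (t, r) v).2) from rfl]
    exact pvFoldText L2 _ true _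
  rw [h1, pvFoldFlag L2 _]

-- ---------- fuel irrelevance of the scanner ----------

theorem pvScanFuel : ∀ f1 f2 s, s.length ≤ f1 → s.length ≤ f2 → pvScanGo f1 s = pvScanGo f2 s := by
  intro f1
  induction f1 with
  | zero =>
    intro f2 s h1 _
    have : s = [] := by cases s <;> simp_all
    subst this
    cases f2 <;> rfl
  | succ f ih =>
    intro f2 s h1 h2
    cases s with
    | nil => cases f2 <;> rfl
    | cons c cs =>
      obtain ⟨f2', rfl⟩ : ∃ f2', f2 = f2' + 1 := by
        cases f2 with
        | zero => simp at h2
        | succ n => exact ⟨n, rfl⟩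
      cases hf : pvMappingC.find? (fun p => p.1.isPrefixOf (c :: cs)) with
      | none =>
        have e1 : pvScanGo (f + 1) (c :: cs) = (c :: (pvScanGo f cs).1, (pvScanGo f cs).2) := by
          simp [pvScanGo, hf]
        have e2 : pvScanGo (f2' + 1) (c :: cs) = (c :: (pvScanGo f2' cs).1, (pvScanGo f2' cs).2) := by
          simp [pvScanGo, hf]
        rw [e1, e2, ih f2' cs (by simp at h1; omega) (by simp at h2; omega)]
      | some p =>
        have hp1 : 1 ≤ p.1.length := by
          have hm := List.mem_of_find?_eq_some hf
          have : ∀ q ∈ pvMappingC, 1 ≤ q.1.length := by decide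
          exact this p hm
        have e1 : pvScanGo (f + 1) (c :: cs) = (p.2 ++ (pvScanGo f (List.drop p.1.length (c :: cs))).1, true) := by
          simp [pvScanGo, hf]
        have e2 : pvScanGo (f2' + 1) (c :: cs) = (p.2 ++ (pvScanGo f2' (List.drop p.1.length (c :: cs))).1, true) := by
          simp [pvScanGo, hf]
        rw [e1, e2, ih f2' (List.drop p.1.length (c :: cs))
              (by simp [List.length_drop] at *; omega)
              (by simp [List.length_drop] at *; omega)]

-- ---------- the good region and the main equivalence on the char level ----------

def pvP (s : List Char) : Prop :=
  ¬ (pvJap <:+: s) ∧ ∀ p, pvChin <+: List.drop p s → (4 ≤ p ∧ pvFren <+: List.drop (p - 4) s)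

theorem pvInfixIff (w s : List Char) : w <:+: s ↔ ∃ p, w <+: List.drop p s := by
  constructor
  · intro h
    exact (PySem.Chars.exists_prefix_drop_iff_isIn w s).mpr ((PySem.Chars.isIn_iff_infix _ _).mpr h)
  · intro h
    obtain ⟨p, hp⟩ := h
    exact (PySem.Chars.isIn_iff_infix _ _).mp ((PySem.Chars.exists_prefix_drop_iff_isIn w s).mp ⟨p, hp⟩)

theorem pvBadB_false_iff (s : List Char) : pvBadB s = false ↔ pvP s := by
  unfold pvBadB pvP
  rw [Bool.or_eq_false_iff]
  constructor
  · rintro ⟨h1, h2⟩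
    refine ⟨(PySem.Chars.isIn_eq_false_iff _ _).mp h1, ?_⟩
    intro p hp
    by_cases hple : p < s.length + 1
    · have h3 := (List.any_eq_false.mp h2) p (List.mem_range.mpr hple)
      rw [List.isPrefixOf_iff_prefix.mpr hp] at h3
      simp only [Bool.true_and] at h3
      have h3' : (decide (4 ≤ p) && pvFren.isPrefixOf (List.drop (p - 4) s)) = true := by
        cases hy : (decide (4 ≤ p) && pvFren.isPrefixOf (List.drop (p - 4) s)) with
        | true => rfl
        | false => rw [hy] at h3; simp at h3
      obtain ⟨hd, hpre⟩ := Bool.and_eq_true_iff.mp h3'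
      exact ⟨of_decide_eq_true hd, List.isPrefixOf_iff_prefix.mp hpre⟩
    · exfalso
      have hnil : List.drop p s = [] := List.drop_eq_nil_of_le (by omega)
      rw [hnil] at hp
      have := hp.length_le
      simp [pvChin] at this
  · rintro ⟨h1, h2⟩
    refine ⟨(PySem.Chars.isIn_eq_false_iff _ _).mpr h1, ?_⟩
    refine List.any_eq_false.mpr ?_
    intro p _
    by_cases hp : pvChin <+: List.drop p s
    · obtain ⟨h4, hf⟩ := h2 p hp
      simp [List.isPrefixOf_iff_prefix.mpr hp, List.isPrefixOf_iff_prefix.mpr hf, h4]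
    · have hfalse : pvChin.isPrefixOf (List.drop p s) = false := by
        rw [← Bool.not_eq_true, List.isPrefixOf_iff_prefix]
        exact hp
      simp [hfalse]

theorem pvPrefixGlue (x y w s : List Char) (hw : w = x ++ y) (hx : x <+: s)
    (hy : y <+: List.drop x.length s) : w <+: s := by
  obtain ⟨u, hu⟩ := hy
  refine ⟨u, ?_⟩
  rw [hw, List.append_assoc, hu]
  exact (List.prefix_append_drop hx).symm

theorem pvPrefixDeglue (x y s : List Char) (h : x ++ y <+: s) : y <+: List.drop x.length s := by
  obtain ⟨u, hu⟩ := h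
  rw [← hu, List.append_assoc, List.drop_left]
  exact ⟨u, rfl⟩

theorem pvPrefixConflict (t1 t2 s : List Char) (h1 : t1 <+: s) (h2 : t2 <+: s)
    (hd1 : ¬ t1 <+: t2) (hd2 : ¬ t2 <+: t1) : False := by
  rcases List.prefix_or_prefix_of_prefix h1 h2 with h | h
  exacts [hd1 h, hd2 h]

theorem pvDropSplit (t s : List Char) (ht : t <+: s) (k : Nat) (hk : k ≤ t.length) :
    List.drop k s = List.drop k t ++ List.drop t.length s := by
  conv_lhs => rw [List.prefix_append_drop ht]
  rw [List.drop_append_of_le_length hk]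

theorem pvPnil : pvP [] := by
  constructor
  · intro h
    have := h.sublist.length_le
    simp [pvJap] at this
  · intro p hp
    rw [List.drop_nil] at hp
    have := hp.length_le
    simp [pvChin] at this

theorem pvPtail (c : Char) (cs : List Char) (hfr : ¬ String.toList "french" <+: c :: cs)
    (h : pvP (c :: cs)) : pvP cs := by
  constructor
  · intro hi
    exact h.1 (List.infix_cons hi)
  · intro p hp
    have hp1 : pvChin <+: List.drop (p + 1) (c :: cs) := by
      rw [List.drop_succ_cons]; exact hp
    obtain ⟨h4, hf⟩ := h.2 (p + 1) hp1
    by_cases hp3 : p = 3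
    · exfalso
      subst hp3
      rw [show (3 + 1 - 4 : Nat) = 0 from rfl, List.drop_zero] at hf
      exact hfr ((by decide : String.toList "french" <+: pvFren).trans hf)
    · refine ⟨by omega, ?_⟩
      rw [show p + 1 - 4 = (p - 4) + 1 from by omega, List.drop_succ_cons] at hf
      exact hf

theorem pvPcons (c : Char) (cs : List Char)
    (hjp : ¬ String.toList "japanese" <+: c :: cs)
    (hch : ¬ String.toList "chinese" <+: c :: cs)
    (h : pvP cs) : pvP (c :: cs) := by
  constructor
  · intro hi
    rcases List.infix_cons_iff.mp hi with hpre | hicons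
    · exact hjp ((by decide : String.toList "japanese" <+: pvJap).trans hpre)
    · exact h.1 hicons
  · intro p hp
    cases p with
    | zero =>
      exfalso
      rw [List.drop_zero] at hp
      exact hch ((by decide : String.toList "chinese" <+: pvChin).trans hp)
    | succ p' =>
      rw [List.drop_succ_cons] at hp
      obtain ⟨h4, hf⟩ := h.2 p' hp
      refine ⟨by omega, ?_⟩
      rw [show p' + 1 - 4 = (p' - 4) + 1 from by omega, List.drop_succ_cons]
      exact hf

theorem pvPdropMatch (t s : List Char) (ht : t <+: s) (hlen : t.length ≤ 9)
    (hfren : ∀ k, k < t.length → t.length ≤ k + 4 → ¬ List.drop k t <+: pvFren)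
    (hP : pvP s) : pvP (List.drop t.length s) := by
  constructor
  · intro hi
    exact hP.1 (hi.trans (List.drop_suffix _ _).isInfix)
  · intro p' hp'
    rw [List.drop_drop] at hp'
    obtain ⟨h4, hf⟩ := hP.2 (t.length + p') hp'
    have hp4 : 4 ≤ p' := by
      by_contra hlt
      have hk1 : t.length + p' - 4 < t.length := by omega
      have hk2 : t.length ≤ (t.length + p' - 4) + 4 := by omega
      rw [pvDropSplit t s ht _ (le_of_lt hk1)] at hf
      rcases pvPrefixAppend _ _ _ hf with hl | ⟨hal, _⟩
      · have hle := hl.length_le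
        have h17 : pvFren.length = 17 := by decide
        simp only [List.length_drop] at hle
        omega
      · exact hfren _ hk1 hk2 hal
    refine ⟨hp4, ?_⟩
    rw [show t.length + p' - 4 = t.length + (p' - 4) from by omega, ← List.drop_drop] at hf
    exact hf

theorem pvPlift (t s : List Char) (ht : t <+: s) (hlen : t.length ≤ 9)
    (hj0 : ¬ pvJap <+: s) (hc0 : ¬ pvChin <+: s)
    (hjin : ∀ p, p < t.length → 0 < p → ¬ List.drop p t <+: pvJap)
    (hcin : ∀ p, p < t.length → 0 < p → List.drop p t <+: pvChin → t = String.toList "french" ∧ p = 4)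
    (hP : pvP (List.drop t.length s)) : pvP s := by
  constructor
  · intro hi
    obtain ⟨p, hp⟩ := (pvInfixIff _ _).mp hi
    by_cases hp0 : p = 0
    · subst hp0
      rw [List.drop_zero] at hp
      exact hj0 hp
    by_cases hpt : p < t.length
    · rw [pvDropSplit t s ht p (le_of_lt hpt)] at hp
      rcases pvPrefixAppend _ _ _ hp with hl | ⟨hal, _⟩
      · have hle := hl.length_le
        have h14 : pvJap.length = 14 := by decide
        simp only [List.length_drop] at hle
        omega
      · exact hjin p hpt (by omega) hal
    · apply hP.1
      refine (pvInfixIff _ _).mpr ⟨p - t.length, ?_⟩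
      rw [List.drop_drop, show t.length + (p - t.length) = p from by omega]
      exact hp
  · intro p hp
    by_cases hp0 : p = 0
    · subst hp0
      rw [List.drop_zero] at hp
      exact absurd hp hc0
    by_cases hpt : p < t.length
    · rw [pvDropSplit t s ht p (le_of_lt hpt)] at hp
      rcases pvPrefixAppend _ _ _ hp with hl | ⟨hal, _⟩
      · have hle := hl.length_le
        have h13 : pvChin.length = 13 := by decide
        simp only [List.length_drop] at hle
        omega
      · obtain ⟨htf, hpf⟩ := hcin p hpt (by omega) hal
        subst hpf
        refine ⟨le_refl 4, ?_⟩
        rw [show (4 : Nat) - 4 = 0 from rfl, List.drop_zero]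
        refine pvPrefixGlue (String.toList "fren") pvChin pvFren s (by decide) ?_ ?_
        · exact (by decide : String.toList "fren" <+: String.toList "french").trans (htf ▸ ht)
        · rw [show (String.toList "fren").length = 4 from by decide]
          rw [pvDropSplit t s ht 4 (by rw [htf]; decide)]
          rw [htf] at hp ⊢
          exact hp
    · obtain ⟨h4, hf⟩ := hP.2 (p - t.length) (by
        rw [List.drop_drop, show t.length + (p - t.length) = p from by omega]; exact hp)
      refine ⟨by omega, ?_⟩
      rw [List.drop_drop, show t.length + (p - t.length - 4) = p - 4 from by omega] at hf
      exact hf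

theorem pvCondSingleton (c : Char) (cs : List Char) (L : List (List Char × List Char))
    (hOk : pvOk L) (hall : ∀ p ∈ L, ¬ p.1 <+: c :: cs) : pvCond [c] L cs := by
  intro p hp k hk
  have hk0 : k = 0 := by simpa using hk
  subst hk0
  constructor
  · intro hpre
    have := hpre.length_le
    have h2 := (hOk p hp).1
    simp at this
    omega
  · intro h1c hdrop
    rcases h1c with ⟨tl, htl⟩
    have hp1 : p.1 = c :: tl := by simpa using htl.symm
    apply hall p hp
    rw [hp1]
    refine List.cons_prefix_cons.mpr ⟨rfl, ?_⟩
    have : tl = List.drop 1 p.1 := by rw [hp1]; simp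
    rw [this]
    simpa using hdrop

-- a step of the main induction for a term matched at the front
theorem pvMainStep (L1 L2 : List (List Char × List Char)) (t r : List Char) (c : Char)
    (cs : List Char) (n : Nat)
    (hLsplit : pvMappingC = L1 ++ (t, r) :: L2)
    (hf : pvMappingC.find? (fun p => p.1.isPrefixOf (c :: cs)) = some (t, r))
    (ht : t <+: c :: cs) (ht1 : 1 ≤ t.length)
    (hc1 : pvCond t L1 (List.drop t.length (c :: cs)))
    (hc2 : ∀ v, pvCond r L2 v)
    (hcslen : cs.length ≤ n)
    (ihall : ∀ s, s.length ≤ n → pvP s → pvFoldC pvMappingC (s, false) = pvScanGo s.length s)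
    (hgrest : pvP (List.drop t.length (c :: cs))) :
    pvFoldC pvMappingC ((c :: cs), false) = pvScanGo (c :: cs).length (c :: cs) := by
  have htne : t ≠ [] := by intro he; rw [he] at ht1; simp at ht1
  have hOk : pvOk pvMappingC := by unfold pvOk pvMappingC; decide
  rw [hLsplit]
  rw [pvFoldPrefix L1 L2 t r (c :: cs) ht htne (hLsplit ▸ hOk) hc1 hc2]
  rw [← hLsplit]
  have hlenrest : (List.drop t.length (c :: cs)).length ≤ n := by
    simp [List.length_drop]; omega
  rw [ihall _ hlenrest hgrest]
  show _ = pvScanGo (cs.length + 1) (c :: cs)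
  have e1 : pvScanGo (cs.length + 1) (c :: cs) = (r ++ (pvScanGo cs.length (List.drop t.length (c :: cs))).1, true) := by
    simp [pvScanGo, hf]
  rw [e1, pvScanFuel cs.length (List.drop t.length (c :: cs)).length (List.drop t.length (c :: cs))
        (by simp [List.length_drop]; omega) le_rfl]

theorem pvCondL1Jap (rest : List Char) (hng : ¬ String.toList "nglish" <+: rest) :
    pvCond (String.toList "japanese")
      [(String.toList "italian", String.toList "x-vow-cuisine-food"),
       (String.toList "english", String.toList "x-vow-cuisine-food"),
       (String.toList "indian", String.toList "x-vow-cuisine-food")] rest := by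
  intro p hp k hk
  have hk8 : k < 8 := by simpa using hk
  simp only [List.mem_cons, List.not_mem_nil, or_false] at hp
  rcases hp with rfl | rfl | rfl
  · interval_cases k <;> exact ⟨by decide, fun h => absurd h (by decide)⟩
  · interval_cases k
    case _ => exact ⟨by decide, fun h => absurd h (by decide)⟩
    case _ => exact ⟨by decide, fun h => absurd h (by decide)⟩
    case _ => exact ⟨by decide, fun h => absurd h (by decide)⟩
    case _ => exact ⟨by decide, fun h => absurd h (by decide)⟩
    case _ => exact ⟨by decide, fun h => absurd h (by decide)⟩
    case _ => exact ⟨by decide, fun h => absurd h (by decide)⟩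
    case _ => exact ⟨by decide, fun h => absurd h (by decide)⟩
    case _ =>
      refine ⟨by decide, fun _ => ?_⟩
      rw [(by decide : List.drop ((String.toList "japanese").length - 7) (String.toList "english") = String.toList "nglish")]
      exact hng
  · interval_cases k <;> exact ⟨by decide, fun h => absurd h (by decide)⟩

theorem pvCondL1Chin (rest : List Char) (hng : ¬ String.toList "nglish" <+: rest) :
    pvCond (String.toList "chinese")
      [(String.toList "italian", String.toList "x-vow-cuisine-food"),
       (String.toList "english", String.toList "x-vow-cuisine-food"),
       (String.toList "indian", String.toList "x-vow-cuisine-food"),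
       (String.toList "japanese", String.toList "x-con-cuisine-food"),
       (String.toList "french", String.toList "x-con-cuisine-food")] rest := by
  intro p hp k hk
  have hk7 : k < 7 := by simpa using hk
  simp only [List.mem_cons, List.not_mem_nil, or_false] at hp
  rcases hp with rfl | rfl | rfl | rfl | rfl
  · interval_cases k <;> exact ⟨by decide, fun h => absurd h (by decide)⟩
  · interval_cases k
    case _ => exact ⟨by decide, fun h => absurd h (by decide)⟩
    case _ => exact ⟨by decide, fun h => absurd h (by decide)⟩
    case _ => exact ⟨by decide, fun h => absurd h (by decide)⟩
    case _ => exact ⟨by decide, fun h => absurd h (by decide)⟩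
    case _ => exact ⟨by decide, fun h => absurd h (by decide)⟩
    case _ => exact ⟨by decide, fun h => absurd h (by decide)⟩
    case _ =>
      refine ⟨by decide, fun _ => ?_⟩
      rw [(by decide : List.drop ((String.toList "chinese").length - 6) (String.toList "english") = String.toList "nglish")]
      exact hng
  · interval_cases k <;> exact ⟨by decide, fun h => absurd h (by decide)⟩
  · interval_cases k <;> exact ⟨by decide, fun h => absurd h (by decide)⟩
  · interval_cases k <;> exact ⟨by decide, fun h => absurd h (by decide)⟩

-- from 'bad word not an infix of s' and 't prefixes s' derive 'the continuation does not prefix the rest'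
theorem pvNoCont (t w bad s : List Char) (hbad : bad = t ++ w)
    (ht : t <+: s) (hg : ¬ bad <:+: s) : ¬ w <+: List.drop t.length s := by
  intro hw
  apply hg
  rcases hw with ⟨u, hu⟩
  have hs : s = t ++ List.drop t.length s := by
    conv_lhs => rw [← List.take_append_drop t.length s]
    rw [← List.prefix_iff_eq_take.mp ht]
  refine ⟨[], u, ?_⟩
  rw [hbad]
  simp only [List.nil_append, List.append_assoc, hu]
  exact hs.symm

theorem pvMain : ∀ n s, s.length ≤ n → pvP s →
    pvFoldC pvMappingC (s, false) = pvScanGo s.length s := by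
  intro n
  induction n with
  | zero =>
    intro s h _
    have : s = [] := by cases s <;> simp_all
    subst this
    decide
  | succ n ih =>
    intro s h hg
    cases s with
    | nil => decide
    | cons c cs =>
      have hcs : cs.length ≤ n := by simp at h; omega
      cases hf : pvMappingC.find? (fun p => p.1.isPrefixOf (c :: cs)) with
      | none =>
        have hall : ∀ p ∈ pvMappingC, ¬ p.1 <+: c :: cs := by
          intro p hp hpre
          have := List.find?_eq_none.mp hf p hp
          simp [List.isPrefixOf_iff_prefix] at this
          exact this hpre
        have hOk : pvOk pvMappingC := by unfold pvOk pvMappingC; decide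
        have hcond := pvCondSingleton c cs pvMappingC hOk hall
        have := pvFoldSplit pvMappingC hOk [c] cs false hcond
        simp only [List.singleton_append] at this
        rw [this]
        rw [ih cs hcs (pvPtail c cs (hall (String.toList "french", String.toList "x-con-cuisine-food") (by decide)) hg)]
        show _ = pvScanGo (cs.length + 1) (c :: cs)
        simp [pvScanGo, hf]
      | some p =>
        have hmem := List.mem_of_find?_eq_some hf
        have hpre : p.1 <+: c :: cs := by
          have := List.find?_some hf
          simpa [List.isPrefixOf_iff_prefix] using this
        have hg1 := hg
        fin_cases hmem
        · exact pvMainStep ([] : List (List Char × List Char)) [(String.toList "english", String.toList "x-vow-cuisine-food"), (String.toList "indian", String.toList "x-vow-cuisine-food"), (String.toList "japanese", String.toList "x-con-cuisine-food"), (String.toList "french", String.toList "x-con-cuisine-food"), (String.toList "chinese", String.toList "x-con-cuisine-food"), (String.toList "fast food", String.toList "x-con-food")] (String.toList "italian") (String.toList "x-vow-cuisine-food") c cs n (by decide) hf hpre (by decide)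
            (pvCondD_cond (String.toList "italian") ([] : List (List Char × List Char)) (by unfold pvCondD; decide) _)
            (pvCondD_cond (String.toList "x-vow-cuisine-food") [(String.toList "english", String.toList "x-vow-cuisine-food"), (String.toList "indian", String.toList "x-vow-cuisine-food"), (String.toList "japanese", String.toList "x-con-cuisine-food"), (String.toList "french", String.toList "x-con-cuisine-food"), (String.toList "chinese", String.toList "x-con-cuisine-food"), (String.toList "fast food", String.toList "x-con-food")] (by unfold pvCondD; decide)) hcs ih (pvPdropMatch _ (c :: cs) hpre (by decide) (by unfold pvFren; decide) hg)
        · exact pvMainStep [(String.toList "italian", String.toList "x-vow-cuisine-food")] [(String.toList "indian", String.toList "x-vow-cuisine-food"), (String.toList "japanese", String.toList "x-con-cuisine-food"), (String.toList "french", String.toList "x-con-cuisine-food"), (String.toList "chinese", String.toList "x-con-cuisine-food"), (String.toList "fast food", String.toList "x-con-food")] (String.toList "english") (String.toList "x-vow-cuisine-food") c cs n (by decide) hf hpre (by decide)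
            (pvCondD_cond (String.toList "english") [(String.toList "italian", String.toList "x-vow-cuisine-food")] (by unfold pvCondD; decide) _)
            (pvCondD_cond (String.toList "x-vow-cuisine-food") [(String.toList "indian", String.toList "x-vow-cuisine-food"), (String.toList "japanese", String.toList "x-con-cuisine-food"), (String.toList "french", String.toList "x-con-cuisine-food"), (String.toList "chinese", String.toList "x-con-cuisine-food"), (String.toList "fast food", String.toList "x-con-food")] (by unfold pvCondD; decide)) hcs ih (pvPdropMatch _ (c :: cs) hpre (by decide) (by unfold pvFren; decide) hg)
        · exact pvMainStep [(String.toList "italian", String.toList "x-vow-cuisine-food"), (String.toList "english", String.toList "x-vow-cuisine-food")] [(String.toList "japanese", String.toList "x-con-cuisine-food"), (String.toList "french", String.toList "x-con-cuisine-food"), (String.toList "chinese", String.toList "x-con-cuisine-food"), (String.toList "fast food", String.toList "x-con-food")] (String.toList "indian") (String.toList "x-vow-cuisine-food") c cs n (by decide) hf hpre (by decide)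
            (pvCondD_cond (String.toList "indian") [(String.toList "italian", String.toList "x-vow-cuisine-food"), (String.toList "english", String.toList "x-vow-cuisine-food")] (by unfold pvCondD; decide) _)
            (pvCondD_cond (String.toList "x-vow-cuisine-food") [(String.toList "japanese", String.toList "x-con-cuisine-food"), (String.toList "french", String.toList "x-con-cuisine-food"), (String.toList "chinese", String.toList "x-con-cuisine-food"), (String.toList "fast food", String.toList "x-con-food")] (by unfold pvCondD; decide)) hcs ih (pvPdropMatch _ (c :: cs) hpre (by decide) (by unfold pvFren; decide) hg)
        · exact pvMainStep [(String.toList "italian", String.toList "x-vow-cuisine-food"), (String.toList "english", String.toList "x-vow-cuisine-food"), (String.toList "indian", String.toList "x-vow-cuisine-food")] [(String.toList "french", String.toList "x-con-cuisine-food"), (String.toList "chinese", String.toList "x-con-cuisine-food"), (String.toList "fast food", String.toList "x-con-food")] (String.toList "japanese") (String.toList "x-con-cuisine-food") c cs n (by decide) hf hpre (by decide)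
            (pvCondL1Jap _ (pvNoCont (String.toList "japanese") (String.toList "nglish") pvJap (c :: cs) (by decide) hpre hg1.1))
            (pvCondD_cond (String.toList "x-con-cuisine-food") [(String.toList "french", String.toList "x-con-cuisine-food"), (String.toList "chinese", String.toList "x-con-cuisine-food"), (String.toList "fast food", String.toList "x-con-food")] (by unfold pvCondD; decide)) hcs ih (pvPdropMatch _ (c :: cs) hpre (by decide) (by unfold pvFren; decide) hg)
        · exact pvMainStep [(String.toList "italian", String.toList "x-vow-cuisine-food"), (String.toList "english", String.toList "x-vow-cuisine-food"), (String.toList "indian", String.toList "x-vow-cuisine-food"), (String.toList "japanese", String.toList "x-con-cuisine-food")] [(String.toList "chinese", String.toList "x-con-cuisine-food"), (String.toList "fast food", String.toList "x-con-food")] (String.toList "french") (String.toList "x-con-cuisine-food") c cs n (by decide) hf hpre (by decide)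
            (pvCondD_cond (String.toList "french") [(String.toList "italian", String.toList "x-vow-cuisine-food"), (String.toList "english", String.toList "x-vow-cuisine-food"), (String.toList "indian", String.toList "x-vow-cuisine-food"), (String.toList "japanese", String.toList "x-con-cuisine-food")] (by unfold pvCondD; decide) _)
            (pvCondD_cond (String.toList "x-con-cuisine-food") [(String.toList "chinese", String.toList "x-con-cuisine-food"), (String.toList "fast food", String.toList "x-con-food")] (by unfold pvCondD; decide)) hcs ih (pvPdropMatch _ (c :: cs) hpre (by decide) (by unfold pvFren; decide) hg)
        · exact pvMainStep [(String.toList "italian", String.toList "x-vow-cuisine-food"), (String.toList "english", String.toList "x-vow-cuisine-food"), (String.toList "indian", String.toList "x-vow-cuisine-food"), (String.toList "japanese", String.toList "x-con-cuisine-food"), (String.toList "french", String.toList "x-con-cuisine-food")] [(String.toList "fast food", String.toList "x-con-food")] (String.toList "chinese") (String.toList "x-con-cuisine-food") c cs n (by decide) hf hpre (by decide)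
            (pvCondL1Chin _ (fun hw => absurd (hg1.2 0 (by rw [List.drop_zero]; exact pvPrefixGlue (String.toList "chinese") (String.toList "nglish") pvChin (c :: cs) (by decide) hpre hw)).1 (by omega)))
            (pvCondD_cond (String.toList "x-con-cuisine-food") [(String.toList "fast food", String.toList "x-con-food")] (by unfold pvCondD; decide)) hcs ih (pvPdropMatch _ (c :: cs) hpre (by decide) (by unfold pvFren; decide) hg)
        · exact pvMainStep [(String.toList "italian", String.toList "x-vow-cuisine-food"), (String.toList "english", String.toList "x-vow-cuisine-food"), (String.toList "indian", String.toList "x-vow-cuisine-food"), (String.toList "japanese", String.toList "x-con-cuisine-food"), (String.toList "french", String.toList "x-con-cuisine-food"), (String.toList "chinese", String.toList "x-con-cuisine-food")] ([] : List (List Char × List Char)) (String.toList "fast food") (String.toList "x-con-food") c cs n (by decide) hf hpre (by decide)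
            (pvCondD_cond (String.toList "fast food") [(String.toList "italian", String.toList "x-vow-cuisine-food"), (String.toList "english", String.toList "x-vow-cuisine-food"), (String.toList "indian", String.toList "x-vow-cuisine-food"), (String.toList "japanese", String.toList "x-con-cuisine-food"), (String.toList "french", String.toList "x-con-cuisine-food"), (String.toList "chinese", String.toList "x-con-cuisine-food")] (by unfold pvCondD; decide) _)
            (pvCondD_cond (String.toList "x-con-food") ([] : List (List Char × List Char)) (by unfold pvCondD; decide)) hcs ih (pvPdropMatch _ (c :: cs) hpre (by decide) (by unfold pvFren; decide) hg)


-- ---------- tightness: A and B really differ everywhere inside D_ ----------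

theorem pvFoldC_cons (p : List Char × List Char) (L : List (List Char × List Char)) (st : List Char × Bool) :
    pvFoldC (p :: L) st = pvFoldC L (pvStepC p st) := rfl

theorem pvNoPre (a t : List Char)
    (hD : ∀ k, k < a.length → ¬ t <+: List.drop k a ∧ ¬ List.drop k a <+: t) (u : List Char) :
    ∀ k, k < a.length → ¬ t <+: (List.drop k a ++ u) := by
  intro k hk hpre
  rcases pvPrefixAppend _ _ _ hpre with hl | ⟨hal, _⟩
  · exact (hD k hk).1 hl
  · exact (hD k hk).2 hal

-- on a string starting with A ++ "english" ("japanesenglish"/"chinesenglish"), A's fold keeps the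
-- "japanes"/"chines" prefix and tags the english, so its output starts with A ++ the english tag
theorem pvFoldHead (s A : List Char) (bad : List Char)
    (hbadeq : bad = A ++ String.toList "english")
    (hpre : bad <+: s)
    (hC1 : ∀ k, k < bad.length → ¬ String.toList "italian" <+: List.drop k bad ∧ ¬ List.drop k bad <+: String.toList "italian")
    (hC2 : ∀ k, k < A.length → ¬ String.toList "english" <+: List.drop k A ∧ ¬ List.drop k A <+: String.toList "english")
    (hC3 : pvCondD (A ++ String.toList "x-vow-cuisine-food") [(String.toList "indian", String.toList "x-vow-cuisine-food"), (String.toList "japanese", String.toList "x-con-cuisine-food"), (String.toList "french", String.toList "x-con-cuisine-food"), (String.toList "chinese", String.toList "x-con-cuisine-food"), (String.toList "fast food", String.toList "x-con-food")]) :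
    ∃ z, (pvFoldC pvMappingC (s, false)).1 = (A ++ String.toList "x-vow-cuisine-food") ++ z := by
  obtain ⟨tl, htl⟩ := hpre
  subst htl
  have hcond1 : pvCond bad [(String.toList "italian", String.toList "x-vow-cuisine-food")] tl := by
    refine pvCondD_cond _ _ ?_ _
    intro p hp k hk
    rcases List.mem_singleton.mp hp with rfl
    exact hC1 k hk
  have h1 := pvFoldSplit [(String.toList "italian", String.toList "x-vow-cuisine-food")]
      (by unfold pvOk; decide) bad tl false hcond1
  set st1 := pvFoldC [(String.toList "italian", String.toList "x-vow-cuisine-food")] (tl, false) with hst1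
  have hisin : PySem.Chars.isIn (String.toList "english") (bad ++ st1.1) = true := by
    refine (PySem.Chars.isIn_iff_infix _ _).mpr ?_
    exact ⟨A, st1.1, by rw [hbadeq, List.append_assoc]⟩
  have hrepl : PySem.Chars.replace (bad ++ st1.1) (String.toList "english") (String.toList "x-vow-cuisine-food")
      = (A ++ String.toList "x-vow-cuisine-food") ++ PySem.Chars.replace st1.1 (String.toList "english") (String.toList "x-vow-cuisine-food") := by
    rw [hbadeq, List.append_assoc]
    rw [pvReplSplit (String.toList "english") (String.toList "x-vow-cuisine-food") (by decide) A _
        (pvNoPre A (String.toList "english") hC2 _)]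
    rw [pvReplMatch _ _ _ (by decide) (List.prefix_append _ _), List.drop_left]
    rw [List.append_assoc]
  have hstep2 : pvStepC (String.toList "english", String.toList "x-vow-cuisine-food") (bad ++ st1.1, st1.2)
      = ((A ++ String.toList "x-vow-cuisine-food") ++ PySem.Chars.replace st1.1 (String.toList "english") (String.toList "x-vow-cuisine-food"), true) := by
    unfold pvStepC
    rw [if_pos]
    · rw [hrepl]
    · exact hisin
  have hOk2 : pvOk [(String.toList "indian", String.toList "x-vow-cuisine-food"), (String.toList "japanese", String.toList "x-con-cuisine-food"), (String.toList "french", String.toList "x-con-cuisine-food"), (String.toList "chinese", String.toList "x-con-cuisine-food"), (String.toList "fast food", String.toList "x-con-food")] := by unfold pvOk; decide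
  have hsplit3 := pvFoldSplit [(String.toList "indian", String.toList "x-vow-cuisine-food"), (String.toList "japanese", String.toList "x-con-cuisine-food"), (String.toList "french", String.toList "x-con-cuisine-food"), (String.toList "chinese", String.toList "x-con-cuisine-food"), (String.toList "fast food", String.toList "x-con-food")] hOk2 (A ++ String.toList "x-vow-cuisine-food")
      (PySem.Chars.replace st1.1 (String.toList "english") (String.toList "x-vow-cuisine-food")) true
      (pvCondD_cond _ _ hC3 _)
  refine ⟨(pvFoldC [(String.toList "indian", String.toList "x-vow-cuisine-food"), (String.toList "japanese", String.toList "x-con-cuisine-food"), (String.toList "french", String.toList "x-con-cuisine-food"), (String.toList "chinese", String.toList "x-con-cuisine-food"), (String.toList "fast food", String.toList "x-con-food")] (PySem.Chars.replace st1.1 (String.toList "english") (String.toList "x-vow-cuisine-food"), true)).1, ?_⟩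
  have hunfold : pvFoldC pvMappingC (bad ++ tl, false)
      = pvFoldC [(String.toList "indian", String.toList "x-vow-cuisine-food"), (String.toList "japanese", String.toList "x-con-cuisine-food"), (String.toList "french", String.toList "x-con-cuisine-food"), (String.toList "chinese", String.toList "x-con-cuisine-food"), (String.toList "fast food", String.toList "x-con-food")] (pvStepC (String.toList "english", String.toList "x-vow-cuisine-food")
          (pvStepC (String.toList "italian", String.toList "x-vow-cuisine-food") (bad ++ tl, false))) := by
    rw [show pvMappingC = (String.toList "italian", String.toList "x-vow-cuisine-food") :: (String.toList "english", String.toList "x-vow-cuisine-food") :: [(String.toList "indian", String.toList "x-vow-cuisine-food"), (String.toList "japanese", String.toList "x-con-cuisine-food"), (String.toList "french", String.toList "x-con-cuisine-food"), (String.toList "chinese", String.toList "x-con-cuisine-food"), (String.toList "fast food", String.toList "x-con-food")] from rfl]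
    rw [pvFoldC_cons, pvFoldC_cons]
  rw [hunfold]
  rw [show pvStepC (String.toList "italian", String.toList "x-vow-cuisine-food") (bad ++ tl, false)
      = pvFoldC [(String.toList "italian", String.toList "x-vow-cuisine-food")] (bad ++ tl, false) from rfl]
  rw [h1, hstep2, hsplit3]

theorem pvTightStep (L1 L2 : List (List Char × List Char)) (t r : List Char) (c : Char)
    (cs : List Char) (n : Nat)
    (hLsplit : pvMappingC = L1 ++ (t, r) :: L2)
    (hf : pvMappingC.find? (fun p => p.1.isPrefixOf (c :: cs)) = some (t, r))
    (ht : t <+: c :: cs) (ht1 : 1 ≤ t.length)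
    (hc1 : pvCond t L1 (List.drop t.length (c :: cs)))
    (hc2 : ∀ v, pvCond r L2 v)
    (hcslen : cs.length ≤ n)
    (ihall : ∀ s, s.length ≤ n → ¬ pvP s → (pvFoldC pvMappingC (s, false)).1 ≠ (pvScanGo s.length s).1)
    (hnprest : ¬ pvP (List.drop t.length (c :: cs))) :
    (pvFoldC pvMappingC ((c :: cs), false)).1 ≠ (pvScanGo (c :: cs).length (c :: cs)).1 := by
  have htne : t ≠ [] := fun he => by rw [he] at ht1; simp at ht1
  have hOk : pvOk pvMappingC := by unfold pvOk pvMappingC; decide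
  have hlenrest : (List.drop t.length (c :: cs)).length ≤ n := by
    simp [List.length_drop]; omega
  intro heq
  apply ihall _ hlenrest hnprest
  have hfold := pvFoldPrefix L1 L2 t r (c :: cs) ht htne (hLsplit ▸ hOk) hc1 hc2
  rw [← hLsplit] at hfold
  have e1 : pvScanGo (c :: cs).length (c :: cs)
      = (r ++ (pvScanGo cs.length (List.drop t.length (c :: cs))).1, true) := by
    show pvScanGo (cs.length + 1) (c :: cs) = _
    simp [pvScanGo, hf]
  rw [hfold, e1] at heq
  dsimp only at heq
  have hcancel := List.append_cancel_left heq
  rw [pvScanFuel cs.length (List.drop t.length (c :: cs)).length (List.drop t.length (c :: cs))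
        (by simp [List.length_drop]; omega) le_rfl] at hcancel
  exact hcancel

theorem pvTight : ∀ n s, s.length ≤ n → ¬ pvP s →
    (pvFoldC pvMappingC (s, false)).1 ≠ (pvScanGo s.length s).1 := by
  intro n
  induction n with
  | zero =>
    intro s h hnp
    have : s = [] := by cases s <;> simp_all
    subst this
    exact absurd pvPnil hnp
  | succ n ih =>
    intro s h hnp
    cases s with
    | nil => exact absurd pvPnil hnp
    | cons c cs =>
      have hcs : cs.length ≤ n := by simp at h; omega
      cases hf : pvMappingC.find? (fun p => p.1.isPrefixOf (c :: cs)) with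
      | none =>
        have hall : ∀ p ∈ pvMappingC, ¬ p.1 <+: c :: cs := by
          intro p hp hpre
          have := List.find?_eq_none.mp hf p hp
          simp [List.isPrefixOf_iff_prefix] at this
          exact this hpre
        have hOk : pvOk pvMappingC := by unfold pvOk pvMappingC; decide
        have hcond := pvCondSingleton c cs pvMappingC hOk hall
        have hsplit := pvFoldSplit pvMappingC hOk [c] cs false hcond
        simp only [List.singleton_append] at hsplit
        have hnpcs : ¬ pvP cs := fun hP => hnp (pvPcons c cs
          (hall (String.toList "japanese", String.toList "x-con-cuisine-food") (by decide))
          (hall (String.toList "chinese", String.toList "x-con-cuisine-food") (by decide)) hP)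
        intro heq
        apply ih cs hcs hnpcs
        have e1 : pvScanGo (c :: cs).length (c :: cs) = (c :: (pvScanGo cs.length cs).1, (pvScanGo cs.length cs).2) := by
          show pvScanGo (cs.length + 1) (c :: cs) = _
          simp [pvScanGo, hf]
        rw [hsplit, e1] at heq
        dsimp only at heq
        exact List.tail_eq_of_cons_eq heq
      | some p =>
        have hmem := List.mem_of_find?_eq_some hf
        have hpre : p.1 <+: c :: cs := by
          have := List.find?_some hf
          simpa [List.isPrefixOf_iff_prefix] using this
        fin_cases hmem
        · exact pvTightStep ([] : List (List Char × List Char)) [(String.toList "english", String.toList "x-vow-cuisine-food"), (String.toList "indian", String.toList "x-vow-cuisine-food"), (String.toList "japanese", String.toList "x-con-cuisine-food"), (String.toList "french", String.toList "x-con-cuisine-food"), (String.toList "chinese", String.toList "x-con-cuisine-food"), (String.toList "fast food", String.toList "x-con-food")] (String.toList "italian") (String.toList "x-vow-cuisine-food") c cs n (by decide) hf hpre (by decide)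
            (pvCondD_cond (String.toList "italian") ([] : List (List Char × List Char)) (by unfold pvCondD; decide) _)
            (pvCondD_cond (String.toList "x-vow-cuisine-food") [(String.toList "english", String.toList "x-vow-cuisine-food"), (String.toList "indian", String.toList "x-vow-cuisine-food"), (String.toList "japanese", String.toList "x-con-cuisine-food"), (String.toList "french", String.toList "x-con-cuisine-food"), (String.toList "chinese", String.toList "x-con-cuisine-food"), (String.toList "fast food", String.toList "x-con-food")] (by unfold pvCondD; decide)) hcs ih
            (fun hPrest => hnp (pvPlift (String.toList "italian") (c :: cs) hpre (by decide)
              (fun hj => pvPrefixConflict (String.toList "japanese") (String.toList "italian") (c :: cs) ((by decide : String.toList "japanese" <+: pvJap).trans hj) hpre (by decide) (by decide)) (fun hcp => pvPrefixConflict (String.toList "chinese") (String.toList "italian") (c :: cs) ((by decide : String.toList "chinese" <+: pvChin).trans hcp) hpre (by decide) (by decide)) (by unfold pvJap; decide) (by unfold pvChin; decide) hPrest))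
        · exact pvTightStep [(String.toList "italian", String.toList "x-vow-cuisine-food")] [(String.toList "indian", String.toList "x-vow-cuisine-food"), (String.toList "japanese", String.toList "x-con-cuisine-food"), (String.toList "french", String.toList "x-con-cuisine-food"), (String.toList "chinese", String.toList "x-con-cuisine-food"), (String.toList "fast food", String.toList "x-con-food")] (String.toList "english") (String.toList "x-vow-cuisine-food") c cs n (by decide) hf hpre (by decide)
            (pvCondD_cond (String.toList "english") [(String.toList "italian", String.toList "x-vow-cuisine-food")] (by unfold pvCondD; decide) _)
            (pvCondD_cond (String.toList "x-vow-cuisine-food") [(String.toList "indian", String.toList "x-vow-cuisine-food"), (String.toList "japanese", String.toList "x-con-cuisine-food"), (String.toList "french", String.toList "x-con-cuisine-food"), (String.toList "chinese", String.toList "x-con-cuisine-food"), (String.toList "fast food", String.toList "x-con-food")] (by unfold pvCondD; decide)) hcs ih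
            (fun hPrest => hnp (pvPlift (String.toList "english") (c :: cs) hpre (by decide)
              (fun hj => pvPrefixConflict (String.toList "japanese") (String.toList "english") (c :: cs) ((by decide : String.toList "japanese" <+: pvJap).trans hj) hpre (by decide) (by decide)) (fun hcp => pvPrefixConflict (String.toList "chinese") (String.toList "english") (c :: cs) ((by decide : String.toList "chinese" <+: pvChin).trans hcp) hpre (by decide) (by decide)) (by unfold pvJap; decide) (by unfold pvChin; decide) hPrest))
        · exact pvTightStep [(String.toList "italian", String.toList "x-vow-cuisine-food"), (String.toList "english", String.toList "x-vow-cuisine-food")] [(String.toList "japanese", String.toList "x-con-cuisine-food"), (String.toList "french", String.toList "x-con-cuisine-food"), (String.toList "chinese", String.toList "x-con-cuisine-food"), (String.toList "fast food", String.toList "x-con-food")] (String.toList "indian") (String.toList "x-vow-cuisine-food") c cs n (by decide) hf hpre (by decide)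
            (pvCondD_cond (String.toList "indian") [(String.toList "italian", String.toList "x-vow-cuisine-food"), (String.toList "english", String.toList "x-vow-cuisine-food")] (by unfold pvCondD; decide) _)
            (pvCondD_cond (String.toList "x-vow-cuisine-food") [(String.toList "japanese", String.toList "x-con-cuisine-food"), (String.toList "french", String.toList "x-con-cuisine-food"), (String.toList "chinese", String.toList "x-con-cuisine-food"), (String.toList "fast food", String.toList "x-con-food")] (by unfold pvCondD; decide)) hcs ih
            (fun hPrest => hnp (pvPlift (String.toList "indian") (c :: cs) hpre (by decide)
              (fun hj => pvPrefixConflict (String.toList "japanese") (String.toList "indian") (c :: cs) ((by decide : String.toList "japanese" <+: pvJap).trans hj) hpre (by decide) (by decide)) (fun hcp => pvPrefixConflict (String.toList "chinese") (String.toList "indian") (c :: cs) ((by decide : String.toList "chinese" <+: pvChin).trans hcp) hpre (by decide) (by decide)) (by unfold pvJap; decide) (by unfold pvChin; decide) hPrest))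
        · by_cases hng : String.toList "nglish" <+: List.drop (String.toList "japanese").length (c :: cs)
          · have hbadpre : pvJap <+: c :: cs :=
              pvPrefixGlue (String.toList "japanese") (String.toList "nglish") pvJap (c :: cs) (by decide) hpre hng
            obtain ⟨z, hz⟩ := pvFoldHead (c :: cs) (String.toList "japanes") pvJap (by decide) hbadpre
              (by unfold pvJap; decide) (by decide) (by unfold pvCondD; decide)
            have e1 : (pvScanGo (c :: cs).length (c :: cs)).1
                = String.toList "x-con-cuisine-food" ++ (pvScanGo cs.length (List.drop (String.toList "japanese").length (c :: cs))).1 := by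
              have : pvScanGo (cs.length + 1) (c :: cs)
                  = (String.toList "x-con-cuisine-food" ++ (pvScanGo cs.length (List.drop (String.toList "japanese").length (c :: cs))).1, true) := by
                simp [pvScanGo, hf]
              rw [show (c :: cs).length = cs.length + 1 from rfl, this]
            intro heq
            rw [hz, e1] at heq
            rw [show (String.toList "japanes" ++ String.toList "x-vow-cuisine-food") = 'j' :: String.toList "apanesx-vow-cuisine-food" from by decide, List.cons_append] at heq
            rw [show String.toList "x-con-cuisine-food" = 'x' :: String.toList "-con-cuisine-food" from by decide, List.cons_append] at heq
            injection heq with h1 _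
            exact absurd h1 (by decide)
          · exact pvTightStep [(String.toList "italian", String.toList "x-vow-cuisine-food"), (String.toList "english", String.toList "x-vow-cuisine-food"), (String.toList "indian", String.toList "x-vow-cuisine-food")] [(String.toList "french", String.toList "x-con-cuisine-food"), (String.toList "chinese", String.toList "x-con-cuisine-food"), (String.toList "fast food", String.toList "x-con-food")] (String.toList "japanese") (String.toList "x-con-cuisine-food") c cs n (by decide) hf hpre (by decide)
              (pvCondL1Jap _ hng)
              (pvCondD_cond (String.toList "x-con-cuisine-food") [(String.toList "french", String.toList "x-con-cuisine-food"), (String.toList "chinese", String.toList "x-con-cuisine-food"), (String.toList "fast food", String.toList "x-con-food")] (by unfold pvCondD; decide)) hcs ih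
              (fun hPrest => hnp (pvPlift (String.toList "japanese") (c :: cs) hpre (by decide)
                (fun hj => hng (pvPrefixDeglue (String.toList "japanese") (String.toList "nglish") (c :: cs) (by rw [show String.toList "japanese" ++ String.toList "nglish" = pvJap from by decide]; exact hj))) (fun hcp => pvPrefixConflict (String.toList "chinese") (String.toList "japanese") (c :: cs) ((by decide : String.toList "chinese" <+: pvChin).trans hcp) hpre (by decide) (by decide)) (by unfold pvJap; decide) (by unfold pvChin; decide) hPrest))
        · exact pvTightStep [(String.toList "italian", String.toList "x-vow-cuisine-food"), (String.toList "english", String.toList "x-vow-cuisine-food"), (String.toList "indian", String.toList "x-vow-cuisine-food"), (String.toList "japanese", String.toList "x-con-cuisine-food")] [(String.toList "chinese", String.toList "x-con-cuisine-food"), (String.toList "fast food", String.toList "x-con-food")] (String.toList "french") (String.toList "x-con-cuisine-food") c cs n (by decide) hf hpre (by decide)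
            (pvCondD_cond (String.toList "french") [(String.toList "italian", String.toList "x-vow-cuisine-food"), (String.toList "english", String.toList "x-vow-cuisine-food"), (String.toList "indian", String.toList "x-vow-cuisine-food"), (String.toList "japanese", String.toList "x-con-cuisine-food")] (by unfold pvCondD; decide) _)
            (pvCondD_cond (String.toList "x-con-cuisine-food") [(String.toList "chinese", String.toList "x-con-cuisine-food"), (String.toList "fast food", String.toList "x-con-food")] (by unfold pvCondD; decide)) hcs ih
            (fun hPrest => hnp (pvPlift (String.toList "french") (c :: cs) hpre (by decide)
              (fun hj => pvPrefixConflict (String.toList "japanese") (String.toList "french") (c :: cs) ((by decide : String.toList "japanese" <+: pvJap).trans hj) hpre (by decide) (by decide)) (fun hcp => pvPrefixConflict (String.toList "chinese") (String.toList "french") (c :: cs) ((by decide : String.toList "chinese" <+: pvChin).trans hcp) hpre (by decide) (by decide)) (by unfold pvJap; decide) (by unfold pvChin; decide) hPrest))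
        · by_cases hng : String.toList "nglish" <+: List.drop (String.toList "chinese").length (c :: cs)
          · have hbadpre : pvChin <+: c :: cs :=
              pvPrefixGlue (String.toList "chinese") (String.toList "nglish") pvChin (c :: cs) (by decide) hpre hng
            obtain ⟨z, hz⟩ := pvFoldHead (c :: cs) (String.toList "chines") pvChin (by decide) hbadpre
              (by unfold pvChin; decide) (by decide) (by unfold pvCondD; decide)
            have e1 : (pvScanGo (c :: cs).length (c :: cs)).1
                = String.toList "x-con-cuisine-food" ++ (pvScanGo cs.length (List.drop (String.toList "chinese").length (c :: cs))).1 := by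
              have : pvScanGo (cs.length + 1) (c :: cs)
                  = (String.toList "x-con-cuisine-food" ++ (pvScanGo cs.length (List.drop (String.toList "chinese").length (c :: cs))).1, true) := by
                simp [pvScanGo, hf]
              rw [show (c :: cs).length = cs.length + 1 from rfl, this]
            intro heq
            rw [hz, e1] at heq
            rw [show (String.toList "chines" ++ String.toList "x-vow-cuisine-food") = 'c' :: String.toList "hinesx-vow-cuisine-food" from by decide, List.cons_append] at heq
            rw [show String.toList "x-con-cuisine-food" = 'x' :: String.toList "-con-cuisine-food" from by decide, List.cons_append] at heq
            injection heq with h1 _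
            exact absurd h1 (by decide)
          · exact pvTightStep [(String.toList "italian", String.toList "x-vow-cuisine-food"), (String.toList "english", String.toList "x-vow-cuisine-food"), (String.toList "indian", String.toList "x-vow-cuisine-food"), (String.toList "japanese", String.toList "x-con-cuisine-food"), (String.toList "french", String.toList "x-con-cuisine-food")] [(String.toList "fast food", String.toList "x-con-food")] (String.toList "chinese") (String.toList "x-con-cuisine-food") c cs n (by decide) hf hpre (by decide)
              (pvCondL1Chin _ hng)
              (pvCondD_cond (String.toList "x-con-cuisine-food") [(String.toList "fast food", String.toList "x-con-food")] (by unfold pvCondD; decide)) hcs ih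
              (fun hPrest => hnp (pvPlift (String.toList "chinese") (c :: cs) hpre (by decide)
                (fun hj => pvPrefixConflict (String.toList "japanese") (String.toList "chinese") (c :: cs) ((by decide : String.toList "japanese" <+: pvJap).trans hj) hpre (by decide) (by decide)) (fun hcp => hng (pvPrefixDeglue (String.toList "chinese") (String.toList "nglish") (c :: cs) (by rw [show String.toList "chinese" ++ String.toList "nglish" = pvChin from by decide]; exact hcp))) (by unfold pvJap; decide) (by unfold pvChin; decide) hPrest))
        · exact pvTightStep [(String.toList "italian", String.toList "x-vow-cuisine-food"), (String.toList "english", String.toList "x-vow-cuisine-food"), (String.toList "indian", String.toList "x-vow-cuisine-food"), (String.toList "japanese", String.toList "x-con-cuisine-food"), (String.toList "french", String.toList "x-con-cuisine-food"), (String.toList "chinese", String.toList "x-con-cuisine-food")] ([] : List (List Char × List Char)) (String.toList "fast food") (String.toList "x-con-food") c cs n (by decide) hf hpre (by decide)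
            (pvCondD_cond (String.toList "fast food") [(String.toList "italian", String.toList "x-vow-cuisine-food"), (String.toList "english", String.toList "x-vow-cuisine-food"), (String.toList "indian", String.toList "x-vow-cuisine-food"), (String.toList "japanese", String.toList "x-con-cuisine-food"), (String.toList "french", String.toList "x-con-cuisine-food"), (String.toList "chinese", String.toList "x-con-cuisine-food")] (by unfold pvCondD; decide) _)
            (pvCondD_cond (String.toList "x-con-food") ([] : List (List Char × List Char)) (by unfold pvCondD; decide)) hcs ih
            (fun hPrest => hnp (pvPlift (String.toList "fast food") (c :: cs) hpre (by decide)
              (fun hj => pvPrefixConflict (String.toList "japanese") (String.toList "fast food") (c :: cs) ((by decide : String.toList "japanese" <+: pvJap).trans hj) hpre (by decide) (by decide)) (fun hcp => pvPrefixConflict (String.toList "chinese") (String.toList "fast food") (c :: cs) ((by decide : String.toList "chinese" <+: pvChin).trans hcp) hpre (by decide) (by decide)) (by unfold pvJap; decide) (by unfold pvChin; decide) hPrest))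


-- A's if/elif classification of the field value equals B's mapping lookup with default
theorem pvTagEq (fv : String) :
    (if (["italian", "english", "indian"] : List String).contains fv then ("x-vow-cuisine-food" : String)
     else if (["japanese", "french", "chinese"] : List String).contains fv then "x-con-cuisine-food"
     else "x-con-food")
    = (PySem.Dict.ofList pvMapping).getD fv "x-con-food" := by
  have h0 : PySem.Dict.ofList pvMapping = PySem.Dict.mk pvMapping := rfl
  rw [h0]
  by_cases h1 : fv = "italian"; · subst h1; rfl
  by_cases h2 : fv = "english"; · subst h2; rfl
  by_cases h3 : fv = "indian"; · subst h3; rfl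
  by_cases h4 : fv = "japanese"; · subst h4; rfl
  by_cases h5 : fv = "french"; · subst h5; rfl
  by_cases h6 : fv = "chinese"; · subst h6; rfl
  by_cases h7 : fv = "fast food"; · subst h7; rfl
  have g1 := Ne.symm h1; have g2 := Ne.symm h2; have g3 := Ne.symm h3
  have g4 := Ne.symm h4; have g5 := Ne.symm h5; have g6 := Ne.symm h6
  have g7 := Ne.symm h7
  simp [pvMapping, PySem.Dict.getD, PySem.Dict.get?, List.contains_eq_mem,
    h1, h2, h3, h4, h5, h6, g1, g2, g3, g4, g5, g6, g7]

-- ===== VERDICT (by name: the statements are the Claim_ definitions above) =====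
theorem delexicalize_food_slug2slug_py_spec : Claim_unchanged_delexicalize_food_slug2slug_py := by
  intro inp output _
  unfold Spec_delexicalize_food_slug2slug_py
  intro hnD
  unfold delexicalize_food_slug2slug_py delexicalize_food_slug2slug_py_alt
  by_cases hc : (PySem.Dict.mk inp).contains "food" = true
  · simp only [hc, if_pos, Bool.true_eq_false, reduceIte]
    rw [← pvTagEq ((PySem.Dict.mk inp).getD "food" "")]
    simp only [apply_ite (PySem.Dict.insert (PySem.Dict.mk inp) "food")]
    cases output with
    | none => rfl
    | some out =>
      dsimp only
      have hgood : pvP out.toList := by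
        refine (pvBadB_false_iff _).mp ?_
        by_contra hbb
        rw [Bool.not_eq_false] at hbb
        exact hnD ⟨hc, by rw [Option.map_some, Option.getD_some, hbb]⟩
      have hA := pvFoldAString out.toList false
      rw [String.ofList_toList] at hA
      rw [hA]
      rw [pvMain out.toList.length out.toList le_rfl hgood]
  · simp only [Bool.not_eq_true] at hc
    simp [hc]

theorem delexicalize_food_slug2slug_py_changed : Claim_changed_delexicalize_food_slug2slug_py := by
  unfold Claim_changed_delexicalize_food_slug2slug_py; decide

theorem delexicalize_food_slug2slug_py_tight : Claim_exact_delexicalize_food_slug2slug_py := by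
  intro inp output _ hD
  obtain ⟨hc, hbad⟩ := hD
  cases output with
  | none => simp at hbad
  | some out =>
    rw [Option.map_some, Option.getD_some] at hbad
    have hnp : ¬ pvP out.toList := by
      intro hp
      rw [(pvBadB_false_iff _).mpr hp] at hbad
      exact Bool.false_ne_true hbad
    intro heq
    unfold delexicalize_food_slug2slug_py delexicalize_food_slug2slug_py_alt at heq
    simp only [hc, if_pos, Bool.true_eq_false, reduceIte] at heq
    have h2 := congrArg (fun y => y.2.1) heq
    dsimp only at h2
    have hA := pvFoldAString out.toList false
    rw [String.ofList_toList] at hA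
    have hA1 := congrArg Prod.fst hA
    dsimp only at hA1
    rw [hA1] at h2
    have h3 := congrArg (fun o => Option.map String.toList o) h2
    simp only [Option.map_some, String.toList_ofList] at h3
    exact pvTight out.toList.length out.toList le_rfl hnp (Option.some.inj h3)
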